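-- pv_equiv track=rewrite | github.com/7-deadly-sens/data-structures-and-algorithms | Chapter 6 - Strings/6_1 Interconvert Strings and Integers.py | string_to_integer
-- ===== SOURCE A (Python) =====
-- def string_to_integer(s):
--     """
--     Convert a string to an integer
--
--     Approach go backward from right to left. Consider cases: "0", "-123" and "123"
--     Or we can go in normal order from left to right.
--     """
--     if (len(s) == 1 and s[0] == "0"): return(0)
--
--     ans = 0
--     total_len = len(s) - 1
--     place = 0
--     if (s[0] == "-"):       # Negative value
--         for ind in range(total_len, 0, -1):
--             digit = ord(s[ind]) - ord('0')
--             ans += digit * (10 ** place)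
--             place += 1
--         return(-1 * ans)
--     else:                   # Positive value
--         for ind in range(total_len, -1, -1):
--             digit = ord(s[ind]) - ord('0')
--             ans += digit * (10 ** place)
--             place += 1
--         return(ans)
-- ===== SOURCE B (Python) =====
-- def string_to_integer(s):
--     # Horner's method: one left-to-right pass, ans = ans*10 + digit.
--     neg = s[0] == "-"
--     ans = 0
--     for ch in (s[1:] if neg else s):
--         ans = ans * 10 + (ord(ch) - ord('0'))
--     return -ans if neg else ans
-- ===== Notes on version B (the rewrite author's own statement) =====
-- stated objective: faster
-- what changed: Replaces the right-to-left loop that recomputes 10**place each digit with a single left-to-right Horner pass (ans = ans*10 + digit).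
-- outside the precondition, e.g. on string_to_integer(''): A raises IndexError, B raises IndexError
import Mathlib
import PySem

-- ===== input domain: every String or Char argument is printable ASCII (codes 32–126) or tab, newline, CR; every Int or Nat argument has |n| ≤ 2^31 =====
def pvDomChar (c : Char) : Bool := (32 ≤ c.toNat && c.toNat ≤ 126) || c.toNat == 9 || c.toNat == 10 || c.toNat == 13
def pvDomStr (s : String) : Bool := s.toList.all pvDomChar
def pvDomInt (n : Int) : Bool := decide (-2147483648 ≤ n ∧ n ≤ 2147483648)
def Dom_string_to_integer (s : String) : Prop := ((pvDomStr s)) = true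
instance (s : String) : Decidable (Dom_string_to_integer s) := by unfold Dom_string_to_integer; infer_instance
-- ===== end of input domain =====

-- B replaces A's right-to-left loop with per-digit 10**place exponentiation by a single
-- left-to-right Horner pass (ans = ans*10 + digit); asymptotically faster, same values.


-- ===== PORT A =====
-- digit at index i: ord(s[ind]) - ord('0'); every call inside A's loops is in range
-- (so pyGet? is some there), the getD 0 default is never used on Pre_ inputs.
def pvDigitA (l : List Char) (i : Int) : Int :=
  match PySem.List.pyGet? l i with
  | some c => (c.toNat : Int) - 48
  | none => 0

-- A's negative-branch loop: 'for ind in range(total_len, 0, -1)' (processes ind, ind-1, …, 1),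
-- state (ans, place), as the obvious structural recursion on the descending index.
def pvLoopNeg (l : List Char) : Nat → Int → Nat → Int
  | 0, ans, _ => ans
  | ind + 1, ans, place => pvLoopNeg l ind (ans + pvDigitA l (ind + 1) * 10 ^ place) (place + 1)

-- A's positive-branch loop: 'for ind in range(total_len, -1, -1)' (processes ind, …, 0).
def pvLoopPos (l : List Char) : Nat → Int → Nat → Int
  | 0, ans, place => ans + pvDigitA l 0 * 10 ^ place
  | ind + 1, ans, place => pvLoopPos l ind (ans + pvDigitA l (ind + 1) * 10 ^ place) (place + 1)

def string_to_integer (s : String) : Int :=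
  let l := s.toList
  if l.length = 1 ∧ PySem.List.pyGet? l 0 = some '0' then 0
  else
    if PySem.List.pyGet? l 0 = some '-' then
      -1 * pvLoopNeg l (l.length - 1) 0 0
    else
      pvLoopPos l (l.length - 1) 0 0

-- ===== PORT B =====
def pvHorner (l : List Char) : Int :=
  l.foldl (fun ans c => ans * 10 + ((c.toNat : Int) - 48)) 0

def string_to_integer_alt (s : String) : Int :=
  match s.toList with
  | '-' :: rest => -(pvHorner rest)
  | l => pvHorner l

-- ===== PRECONDITION & SPEC =====
-- Pre_ excludes only the empty string, on which A raises IndexError (s[0]).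
def Pre_string_to_integer (s : String) : Prop := s ≠ ""
instance (s : String) : Decidable (Pre_string_to_integer s) := by unfold Pre_string_to_integer; infer_instance
def pvWitness_string_to_integer : String := "-123"

def Spec_string_to_integer (s : String) (out : Int) : Prop := out = string_to_integer_alt s
instance (s : String) (out : Int) : Decidable (Spec_string_to_integer s out) := by unfold Spec_string_to_integer; infer_instance

-- ===== CLAIM (what is proved, stated in full; the proofs are below) =====
def Claim_equal_string_to_integer : Prop := ∀ (s : String), Dom_string_to_integer s → Pre_string_to_integer s → Spec_string_to_integer s (string_to_integer s)

-- ===== LEMMAS AND PROOFS =====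

theorem pvHorner_append_one (l : List Char) (c : Char) :
    pvHorner (l ++ [c]) = pvHorner l * 10 + ((c.toNat : Int) - 48) := by
  simp [pvHorner]

-- Invariant of A's positive loop: processing indices n,…,0 with state (ans, place)
-- contributes the Horner value of the first n+1 characters shifted by 10^place.
theorem pvLoopPos_eq (l : List Char) (n : Nat) (hn : n < l.length) :
    ∀ (ans : Int) (place : Nat),
      pvLoopPos l n ans place = ans + pvHorner (l.take (n + 1)) * 10 ^ place := by
  induction n with
  | zero =>
    intro ans place
    obtain ⟨c, t, rfl⟩ : ∃ c t, l = c :: t := by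
      cases l with
      | nil => simp at hn
      | cons c t => exact ⟨c, t, rfl⟩
    simp [pvLoopPos, pvDigitA, pvHorner]
  | succ n ih =>
    intro ans place
    have hn' : n < l.length := Nat.lt_of_succ_lt hn
    have hget : PySem.List.pyGet? l ((n : Int) + 1) = some l[n + 1] := by
      have := PySem.List.pyGet?_ofNat (xs := l) (n := n + 1) hn
      simpa [Nat.cast_add] using this
    have htake : l.take (n + 1 + 1) = l.take (n + 1) ++ [l[n + 1]] := by
      rw [List.take_add_one]
      simp [List.getElem?_eq_getElem hn]
    have hstep : pvLoopPos l (n + 1) ans place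
        = pvLoopPos l n (ans + pvDigitA l ((n : Int) + 1) * 10 ^ place) (place + 1) := by
      simp [pvLoopPos]
    rw [hstep, ih hn' _ (place + 1)]
    rw [htake, pvHorner_append_one]
    simp [pvDigitA, hget]
    ring

-- Same invariant for the negative loop (indices n,…,1; characters l[1..n]).
theorem pvLoopNeg_eq (l : List Char) (n : Nat) (hn : n < l.length) :
    ∀ (ans : Int) (place : Nat),
      pvLoopNeg l n ans place = ans + pvHorner ((l.drop 1).take n) * 10 ^ place := by
  induction n with
  | zero => intro ans place; simp [pvLoopNeg, pvHorner]
  | succ n ih =>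
    intro ans place
    have hn' : n < l.length := Nat.lt_of_succ_lt hn
    have hlt : n < (l.drop 1).length := by
      cases l with
      | nil => simp at hn
      | cons c t => simpa using Nat.lt_of_succ_lt_succ hn
    have hget : PySem.List.pyGet? l ((n : Int) + 1) = some (l.drop 1)[n] := by
      have h1 : (l.drop 1)[n] = l[n + 1] := by
        cases l with
        | nil => simp at hn
        | cons c t => simp
      rw [h1]
      have := PySem.List.pyGet?_ofNat (xs := l) (n := n + 1) hn
      simpa [Nat.cast_add] using this
    have htake : (l.drop 1).take (n + 1) = (l.drop 1).take n ++ [(l.drop 1)[n]] := by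
      rw [List.take_add_one]
      simp
    have hstep : pvLoopNeg l (n + 1) ans place
        = pvLoopNeg l n (ans + pvDigitA l ((n : Int) + 1) * 10 ^ place) (place + 1) := by
      simp [pvLoopNeg]
    rw [hstep, ih hn' _ (place + 1)]
    rw [htake, pvHorner_append_one]
    simp [pvDigitA, hget]
    ring

-- ===== VERDICT (by name: the statement is the Claim_ definition above) =====
theorem string_to_integer_spec : Claim_equal_string_to_integer := by
  intro s _ hpre
  unfold Spec_string_to_integer
  have hl : s.toList ≠ [] := by
    intro h
    exact hpre (by cases s; simp_all)
  unfold string_to_integer string_to_integer_alt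
  cases hcl : s.toList with
  | nil => exact absurd hcl hl
  | cons c t =>
    simp only [PySem.List.pyGet?_zero_cons]
    by_cases h0 : (c :: t).length = 1 ∧ (some c : Option Char) = some '0'
    · -- s = "0": both sides are 0
      obtain ⟨hlen, hc⟩ := h0
      have ht : t = [] := by simpa using hlen
      have hc' : c = '0' := by simpa using hc
      subst ht; subst hc'
      simp [pvHorner]
    · rw [if_neg h0]
      by_cases hneg : (some c : Option Char) = some '-'
      · have hc' : c = '-' := by simpa using hneg
        subst hc'
        rw [if_pos rfl]
        have := pvLoopNeg_eq ('-' :: t) t.length (by simp) 0 0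
        simp only [List.length_cons, Nat.add_sub_cancel]
        rw [this]
        simp
      · have hc' : c ≠ '-' := by simpa using hneg
        rw [if_neg hneg]
        have := pvLoopPos_eq (c :: t) t.length (by simp) 0 0
        simp only [List.length_cons, Nat.add_sub_cancel]
        rw [this]
        cases c
        simp_all [pvHorner]
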